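-- pv_equiv track=rewrite | github.com/bfxh/ai-platform | user/global/plugin/gstack-core/smart_system.py | _optimize_steps
-- ===== SOURCE A (Python) =====
-- from typing import Dict, List, Optional, Any
--
-- def _optimize_steps(steps: List[Dict]) -> List[Dict]:
--     """优化步骤顺序"""
--     # 简单的优化：确保搜索步骤在前
--     search_steps = []
--     other_steps = []
--
--     for step in steps:
--         if step["action"] == "search_repos":
--             search_steps.append(step)
--         else:
--             other_steps.append(step)
--
--     return search_steps + other_steps
-- ===== SOURCE B (Python) =====
-- from typing import Dict, List, Optional, Any
--
-- def _optimize_steps(steps: List[Dict]) -> List[Dict]: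
--     """优化步骤顺序"""
--     # Stable sort: search_repos steps get key False and come first; stability
--     # preserves the original relative order within each group.
--     return sorted(steps, key=lambda step: step["action"] != "search_repos")
-- ===== Notes on version B (the rewrite author's own statement) =====
-- stated objective: idiomatic
-- what changed: Replaced the two-accumulator partition loop with a single stable sort keyed on step['action'] != 'search_repos'; stability preserves the in-group order, so the result is identical.
import Mathlib
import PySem

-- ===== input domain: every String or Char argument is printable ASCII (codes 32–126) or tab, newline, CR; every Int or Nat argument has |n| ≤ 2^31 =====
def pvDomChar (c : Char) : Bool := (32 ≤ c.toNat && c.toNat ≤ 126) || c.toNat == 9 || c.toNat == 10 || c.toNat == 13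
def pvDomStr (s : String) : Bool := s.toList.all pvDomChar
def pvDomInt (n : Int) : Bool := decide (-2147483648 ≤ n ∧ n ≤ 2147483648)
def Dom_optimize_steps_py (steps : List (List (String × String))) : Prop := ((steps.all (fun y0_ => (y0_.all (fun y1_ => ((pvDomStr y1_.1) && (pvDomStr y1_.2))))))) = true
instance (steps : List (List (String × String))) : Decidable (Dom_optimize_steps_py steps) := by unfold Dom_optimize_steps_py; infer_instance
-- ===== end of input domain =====

-- B replaces A's two-accumulator partition loop by a single stable sort on the
-- boolean key step["action"] != "search_repos" (idiomatic; same return value).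

-- step["action"]: first-match lookup in the association list (none = KeyError)
def pvGetAction (step : List (String × String)) : Option String :=
  (step.find? (fun p => p.1 == "action")).map (·.2)

-- step["action"] == "search_repos" (total form; Pre_ guarantees the key exists)
def pvIsSearch (step : List (String × String)) : Bool :=
  (pvGetAction step).getD "" == "search_repos"

-- ===== PORT A =====
def optimize_steps_py (steps : List (List (String × String))) : List (List (String × String)) :=
  let r := steps.foldl
    (fun (acc : List (List (String × String)) × List (List (String × String))) step =>
      if pvIsSearch step then (acc.1 ++ [step], acc.2) else (acc.1, acc.2 ++ [step]))
    ([], [])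
  r.1 ++ r.2

-- ===== PORT B =====
def optimize_steps_py_alt (steps : List (List (String × String))) : List (List (String × String)) :=
  PySem.List.sorted steps (fun step => (pvGetAction step).getD "" != "search_repos") false

-- ===== PRECONDITION & SPEC =====
-- Pre_ excludes inputs where some step lacks the key "action": there Python A
-- (and B alike) raises KeyError.
def Pre_optimize_steps_py (steps : List (List (String × String))) : Prop :=
  ∀ step ∈ steps, (pvGetAction step).isSome = true
instance (steps : List (List (String × String))) : Decidable (Pre_optimize_steps_py steps) := by unfold Pre_optimize_steps_py; infer_instance

def pvWitness_optimize_steps_py : (List (List (String × String))) :=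
  [[("action", "search_repos")], [("action", "build")]]

def Spec_optimize_steps_py (steps : List (List (String × String))) (out : List (List (String × String))) : Prop := out = optimize_steps_py_alt steps
instance (steps : List (List (String × String))) (out : List (List (String × String))) : Decidable (Spec_optimize_steps_py steps out) := by unfold Spec_optimize_steps_py; infer_instance

-- ===== CLAIM (what is proved, stated in full; the proofs are below) =====
def Claim_equal_optimize_steps_py : Prop := ∀ (steps : List (List (String × String))), Dom_optimize_steps_py steps → Pre_optimize_steps_py steps → Spec_optimize_steps_py steps (optimize_steps_py steps)

-- ===== LEMMAS AND PROOFS =====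

-- inserting a key-false element into (all-false ++ all-true) puts it at the end of the false block
lemma pv_insertBy_false {α : Type} (k : α → Bool) (x : α) (hx : k x = false) :
    ∀ (A B : List α), (∀ a ∈ A, k a = false) → (∀ b ∈ B, k b = true) →
      PySem.List.insertBy (fun a b => decide (k a < k b)) x (A ++ B) = (A ++ [x]) ++ B := by
  intro A
  induction A with
  | nil =>
    intro B _ hB
    cases B with
    | nil => simp [PySem.List.insertBy]
    | cons b B' =>
      have hb : k b = true := hB b (by simp)
      simp [PySem.List.insertBy, hx, hb]
  | cons a A' ih =>
    intro B hA hB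
    have ha : k a = false := hA a (by simp)
    have hA' : ∀ y ∈ A', k y = false := fun y hy => hA y (List.mem_cons_of_mem _ hy)
    simp [PySem.List.insertBy, hx, ha, ih B hA' hB]

-- inserting a key-true element appends it at the very end
lemma pv_insertBy_true {α : Type} (k : α → Bool) (x : α) (hx : k x = true)
    (ys : List α) :
    PySem.List.insertBy (fun a b => decide (k a < k b)) x ys = ys ++ [x] := by
  apply PySem.List.insertBy_of_forall_not_before
  intro y _
  simp [hx]

-- the insertion-sort fold with a boolean key keeps a (false-block ++ true-block) shape
lemma pv_foldl_insertBy (k : List (String × String) → Bool)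
    (xs : List (List (String × String))) :
    ∀ (A B : List (List (String × String))),
      (∀ a ∈ A, k a = false) → (∀ b ∈ B, k b = true) →
      xs.foldl (fun acc x => PySem.List.insertBy (fun a b => decide (k a < k b)) x acc) (A ++ B)
        = (A ++ xs.filter (fun x => !k x)) ++ (B ++ xs.filter k) := by
  induction xs with
  | nil => intro A B _ _; simp
  | cons x xs ih =>
    intro A B hA hB
    simp only [List.foldl_cons]
    cases hx : k x with
    | false =>
      have hA' : ∀ a ∈ A ++ [x], k a = false := by
        intro a ha
        rcases List.mem_append.1 ha with h | h
        · exact hA a h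
        · simp at h; subst h; exact hx
      rw [pv_insertBy_false k x hx A B hA hB, ih (A ++ [x]) B hA' hB]
      simp [hx]
    | true =>
      have hB' : ∀ b ∈ B ++ [x], k b = true := by
        intro b hb
        rcases List.mem_append.1 hb with h | h
        · exact hB b h
        · simp at h; subst h; exact hx
      rw [pv_insertBy_true k x hx (A ++ B), List.append_assoc, ih A (B ++ [x]) hA hB']
      simp [hx]

-- the stable sort on a boolean key IS the partition: false block first, each in input order
lemma pv_sorted_bool (k : List (String × String) → Bool)
    (xs : List (List (String × String))) :
    PySem.List.sorted xs (fun x => k x) false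
      = xs.filter (fun x => !k x) ++ xs.filter k := by
  rw [PySem.List.sorted_eq_foldl_insertBy]
  have := pv_foldl_insertBy k xs [] [] (by simp) (by simp)
  simpa using this

-- A's partition loop, with general accumulators
lemma pv_loopA (xs : List (List (String × String))) :
    ∀ (a b : List (List (String × String))),
      xs.foldl
        (fun (acc : List (List (String × String)) × List (List (String × String))) step =>
          if pvIsSearch step then (acc.1 ++ [step], acc.2) else (acc.1, acc.2 ++ [step]))
        (a, b)
      = (a ++ xs.filter pvIsSearch, b ++ xs.filter (fun x => !pvIsSearch x)) := by
  induction xs with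
  | nil => intro a b; simp
  | cons x xs ih =>
    intro a b
    simp only [List.foldl_cons]
    cases hx : pvIsSearch x with
    | false =>
      simp only [Bool.false_eq_true, if_false]
      rw [ih]
      simp [hx]
    | true =>
      simp only [if_true]
      rw [ih]
      simp [hx]

-- ===== VERDICT (by name: the statement is the Claim_ definition above) =====
theorem optimize_steps_py_spec : Claim_equal_optimize_steps_py := by
  intro steps _ _
  show optimize_steps_py steps = optimize_steps_py_alt steps
  have hk : (fun step => (pvGetAction step).getD "" != "search_repos")
          = (fun step => !pvIsSearch step) := by
    funext step; simp [pvIsSearch, bne]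
  rw [optimize_steps_py, optimize_steps_py_alt, pv_loopA steps [] [], hk,
      pv_sorted_bool (fun step => !pvIsSearch step) steps]
  simp
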